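-- pv_equiv track=rewrite | github.com/josephzh-23/python_alogrithm | Graph/dfs_with_return/dfs_with_return.py | isCaptured
-- ===== SOURCE A (Python) =====
-- from typing import List
--
-- def isCaptured(grid: List[List[str]]) -> int:
--     # check to see if the board is captured here
--     def dfs(grid, i, j):
--
--         if (i < 0 or i>= len(grid)) or ( j< 0 or j >= len(grid[0])) or grid[i][j] == '1':
--             return True
--         # Not surrounded
--         if grid[i][j] == '-':
--             return False
--
--         grid[i][j] = '1'
--         return dfs(grid, i - 1, j) and dfs(grid, i + 1, j) and dfs(grid, i, j - 1) and dfs(grid, i, j + 1)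
--
--     for row in range(len(grid)):
--         for col in range(len(grid[0])):
--             if grid[row][col] == '0':
--                 if (not dfs(grid, row, col)):
--                     return False
--
--     return True
-- ===== SOURCE B (Python) =====
-- def isCaptured(grid):
--     rows = len(grid)
--     cols = len(grid[0]) if grid else 0
--     visited = set()
--     for r in range(rows):
--         for c in range(cols):
--             if grid[r][c] != '0' or (r, c) in visited:
--                 continue
--             stack = [(r, c)]
--             while stack:
--                 i, j = stack.pop()
--                 if i < 0 or i >= rows or j < 0 or j >= cols or (i, j) in visited or grid[i][j] == '1':
--                     continue
--                 if grid[i][j] == '-':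
--                     return False
--                 visited.add((i, j))
--                 stack.append((i, j + 1))
--                 stack.append((i, j - 1))
--                 stack.append((i + 1, j))
--                 stack.append((i - 1, j))
--     return True
-- ===== Notes on version B (the rewrite author's own statement) =====
-- stated objective: alternative
-- what changed: A's recursive DFS that marks the grid in place and short-circuits with 'and' is replaced by an iterative explicit-stack flood fill over an immutable grid that records visited cells in a separate set (so the grid is read-only and the walls are 'original 1 or already visited')
-- outside the precondition, e.g. on isCaptured([['0', '0'], ['-']]): A returns False, B returns False
import Mathlib
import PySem

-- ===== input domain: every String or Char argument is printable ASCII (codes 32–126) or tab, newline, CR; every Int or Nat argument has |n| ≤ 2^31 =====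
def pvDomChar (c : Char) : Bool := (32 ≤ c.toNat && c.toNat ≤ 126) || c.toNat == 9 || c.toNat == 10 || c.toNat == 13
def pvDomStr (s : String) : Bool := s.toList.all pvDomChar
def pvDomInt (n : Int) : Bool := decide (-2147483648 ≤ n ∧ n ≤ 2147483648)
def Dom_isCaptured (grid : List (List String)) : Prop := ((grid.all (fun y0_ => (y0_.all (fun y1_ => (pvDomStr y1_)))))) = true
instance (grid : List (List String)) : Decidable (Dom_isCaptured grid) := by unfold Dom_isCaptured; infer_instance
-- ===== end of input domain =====

-- B replaces A's recursive in-place-marking DFS by an iterative explicit-stack flood fill over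
-- an IMMUTABLE grid with a separate visited set; equivalence is about the RETURN value only
-- (Python A mutates the caller's grid in place, Python B does not mutate it at all).

-- A reads grid cells through possibly mutated state; guarded in-bounds before every access, so
-- .toNat access is exact there; an out-of-range COLUMN (a ragged short row, excluded by Pre_,
-- where Python raises IndexError) reads as a wall "1".
def pvCellAt (g : List (List String)) (i j : Int) : String :=
  (g.getD i.toNat []).getD j.toNat "1"

-- grid[i][j] = '1'  (A-side mutation)
def pvMark (g : List (List String)) (i j : Int) : List (List String) :=
  g.set i.toNat ((g.getD i.toNat []).set j.toNat "1")

-- number of cells ≠ '1' (termination measure for A's dfs only)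
def pvFree (g : List (List String)) : Nat :=
  (g.map (fun r => (r.filter (fun s => decide (s ≠ "1"))).length)).sum

-- ===== PORT A =====
-- A's recursive dfs; returns (result, mutated grid). The fuel argument only makes the
-- recursion structural: one unit is consumed per call, and every call that recurses first
-- marks a fresh cell '1', so the recursion depth is at most pvFree g + 1; isCaptured always
-- supplies fuel pvFree g + 1, and the fuel-exhausted branch is never reached (fill_sim below
-- is proved for every sufficient fuel).
def dfsF : Nat → List (List String) → Int → Int → Bool × List (List String)
  | 0, g, _, _ => (true, g)
  | fuel + 1, g, i, j =>
    if i < 0 ∨ (g.length : Int) ≤ i ∨ j < 0 ∨ ((g.head?.getD []).length : Int) ≤ j ∨ pvCellAt g i j = "1" then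
      (true, g)
    else if pvCellAt g i j = "-" then
      (false, g)
    else
      let r1 := dfsF fuel (pvMark g i j) (i - 1) j
      if r1.1 = false then (false, r1.2)
      else
        let r2 := dfsF fuel r1.2 (i + 1) j
        if r2.1 = false then (false, r2.2)
        else
          let r3 := dfsF fuel r2.2 i (j - 1)
          if r3.1 = false then (false, r3.2)
          else dfsF fuel r3.2 i (j + 1)

-- A's outer row/col scan over the (constant-length) grid, threading the mutated grid
def scanA : List (List String) → List (Int × Int) → Bool
  | _, [] => true
  | g, (r, c) :: rest =>
    if pvCellAt g r c = "0" then
      let d := dfsF (pvFree g + 1) g r c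
      if d.1 then scanA d.2 rest else false
    else scanA g rest

-- row-major cell order of 'for row in range(len(grid)): for col in range(len(grid[0]))'
def pvIndexList (g : List (List String)) : List (Int × Int) :=
  (List.range g.length).flatMap
    (fun (r : Nat) => (List.range (g.head?.getD []).length).map (fun (c : Nat) => (Int.ofNat r, Int.ofNat c)))

def isCaptured (grid : List (List String)) : Bool :=
  scanA grid (pvIndexList grid)

-- ===== PORT B =====
-- B's cells still ≠ visited, restricted to the rows×cols rectangle (termination measure)
def pvCells (rows cols : Int) : List (Int × Int) :=
  (List.range rows.toNat).flatMap
    (fun (r : Nat) => (List.range cols.toNat).map (fun (c : Nat) => (Int.ofNat r, Int.ofNat c)))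

def pvRemain (rows cols : Int) (vis : PySem.Set (Int × Int)) : Nat :=
  ((pvCells rows cols).filter (fun p => decide (p ∉ vis))).length

theorem pvMem_pvCells (rows cols i j : Int)
    (h1 : 0 ≤ i) (h2 : i < rows) (h3 : 0 ≤ j) (h4 : j < cols) : (i, j) ∈ pvCells rows cols :=
  List.mem_flatMap.mpr
    ⟨i.toNat, List.mem_range.mpr ((Int.toNat_lt_toNat (lt_of_le_of_lt h1 h2)).mpr h2),
      List.mem_map.mpr ⟨j.toNat, List.mem_range.mpr ((Int.toNat_lt_toNat (lt_of_le_of_lt h3 h4)).mpr h4),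
        by rw [Prod.mk.injEq]; exact ⟨Int.toNat_of_nonneg h1, Int.toNat_of_nonneg h3⟩⟩⟩

theorem pvDecNe {P : Prop} [Decidable P] (h : ¬P) : ¬(decide P = true) :=
  fun hc => h (of_decide_eq_true hc)

theorem pvRemain_add_lt (rows cols : Int) (vis : PySem.Set (Int × Int)) (q : Int × Int)
    (hq : q ∈ pvCells rows cols) (hnv : q ∉ vis) :
    pvRemain rows cols (PySem.Set.add vis q) < pvRemain rows cols vis := by
  unfold pvRemain
  rw [PySem.Set.add_of_not_mem hnv]
  generalize pvCells rows cols = l at hq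
  induction l with
  | nil => cases hq
  | cons a t ih =>
    by_cases ha : a = q
    · subst ha
      rw [List.filter_cons_of_neg (p := fun p => decide (p ∉ vis ++ [a]))
          (pvDecNe (fun hc => hc (List.mem_append_right _ (List.mem_singleton.mpr rfl)))),
        List.filter_cons_of_pos (p := fun p => decide (p ∉ vis)) (decide_eq_true hnv),
        List.length_cons]
      refine Nat.lt_succ_of_le ?_
      rw [← List.countP_eq_length_filter, ← List.countP_eq_length_filter]
      exact List.countP_mono_left
        (fun x _ hx => decide_eq_true (fun hc => (of_decide_eq_true hx) (List.mem_append_left _ hc)))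
    · have hqt : q ∈ t := (List.mem_cons.mp hq).resolve_left (fun e => ha e.symm)
      by_cases hav : a ∈ vis
      · rw [List.filter_cons_of_neg (p := fun p => decide (p ∉ vis ++ [q]))
            (pvDecNe (fun hc => hc (List.mem_append_left _ hav))),
          List.filter_cons_of_neg (p := fun p => decide (p ∉ vis)) (pvDecNe (fun hc => hc hav))]
        exact ih hqt
      · rw [List.filter_cons_of_pos (p := fun p => decide (p ∉ vis ++ [q]))
            (decide_eq_true (fun hc => (List.mem_append.mp hc).elim hav
              (fun hs => ha (List.mem_singleton.mp hs)))),
          List.filter_cons_of_pos (p := fun p => decide (p ∉ vis)) (decide_eq_true hav),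
          List.length_cons, List.length_cons]
        exact Nat.succ_lt_succ (ih hqt)

-- B's flood fill: pop the stack; skip off-grid, already-visited and '1' cells; fail (none)
-- on '-'; otherwise record the cell as visited and push the four neighbours.
def fillB (g : List (List String)) (rows cols : Int) (vis : PySem.Set (Int × Int))
    (stack : List (Int × Int)) : Option (PySem.Set (Int × Int)) :=
  match stack with
  | [] => some vis
  | (i, j) :: rest =>
    if h1 : i < 0 ∨ rows ≤ i ∨ j < 0 ∨ cols ≤ j ∨ (i, j) ∈ vis ∨ pvCellAt g i j = "1" then
      fillB g rows cols vis rest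
    else if pvCellAt g i j = "-" then
      none
    else
      fillB g rows cols (PySem.Set.add vis (i, j)) ((i - 1, j) :: (i + 1, j) :: (i, j - 1) :: (i, j + 1) :: rest)
termination_by (pvRemain rows cols vis, stack.length)
decreasing_by
  · exact Prod.Lex.right _ (Nat.lt_succ_self _)
  · exact Prod.Lex.left _ _
      (pvRemain_add_lt rows cols vis (i, j)
        (pvMem_pvCells rows cols i j
          (not_lt.mp (fun hc => h1 (Or.inl hc)))
          (not_le.mp (fun hc => h1 (Or.inr (Or.inl hc))))
          (not_lt.mp (fun hc => h1 (Or.inr (Or.inr (Or.inl hc)))))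
          (not_le.mp (fun hc => h1 (Or.inr (Or.inr (Or.inr (Or.inl hc)))))))
        (fun hc => h1 (Or.inr (Or.inr (Or.inr (Or.inr (Or.inl hc)))))))

-- B's outer row/col scan: start a flood fill at each '0' cell not seen by an earlier fill
def scanB (g : List (List String)) (rows cols : Int) :
    PySem.Set (Int × Int) → List (Int × Int) → Bool
  | _, [] => true
  | vis, (r, c) :: rest =>
    if pvCellAt g r c ≠ "0" ∨ (r, c) ∈ vis then scanB g rows cols vis rest
    else
      match fillB g rows cols vis [(r, c)] with
      | none => false
      | some vis' => scanB g rows cols vis' rest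

def isCaptured_alt (grid : List (List String)) : Bool :=
  scanB grid (grid.length : Int)
    (match grid with | [] => (0 : Int) | r :: _ => (r.length : Int))
    PySem.Set.empty
    (pvCells (grid.length : Int)
      (match grid with | [] => (0 : Int) | r :: _ => (r.length : Int)))

-- ===== PRECONDITION & SPEC =====
-- Pre_ excludes ragged grids in which some row is shorter than the first row: there the
-- Python code's grid[row][col] indexing (scan and dfs both use len(grid[0]) as the width)
-- raises IndexError, except for rare early-False runs that both programs answer alike.
def Pre_isCaptured (grid : List (List String)) : Prop :=
  ∀ row ∈ grid, (grid.headD []).length ≤ row.length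
instance (grid : List (List String)) : Decidable (Pre_isCaptured grid) := by
  unfold Pre_isCaptured; infer_instance

def pvWitness_isCaptured : List (List String) := [["0", "1"], ["-", "1"]]

def Spec_isCaptured (grid : List (List String)) (out : Bool) : Prop := out = isCaptured_alt grid
instance (grid : List (List String)) (out : Bool) : Decidable (Spec_isCaptured grid out) := by
  unfold Spec_isCaptured; infer_instance

-- ===== CLAIM (what is proved, stated in full; the proofs are below) =====
def Claim_equal_isCaptured : Prop :=
  ∀ (grid : List (List String)), Dom_isCaptured grid → Pre_isCaptured grid →
    Spec_isCaptured grid (isCaptured grid)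

-- ===== LEMMAS AND PROOFS =====

theorem pvFilter_set_lt (l : List String) (m : Nat) (hm : m < l.length) (h : ¬ l[m] = "1") :
    ((l.set m "1").filter (fun s => decide (s ≠ "1"))).length
      < (l.filter (fun s => decide (s ≠ "1"))).length := by
  induction l generalizing m with
  | nil => exact absurd hm (by simp)
  | cons a t ih =>
    cases m with
    | zero =>
      simp only [List.getElem_cons_zero] at h
      rw [List.set_cons_zero, List.filter_cons_of_neg (by decide),
        List.filter_cons_of_pos (by simp [h]), List.length_cons]
      exact Nat.lt_succ_self _
    | succ m =>
      simp only [List.getElem_cons_succ] at h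
      simp only [List.length_cons, Nat.succ_lt_succ_iff] at hm
      rw [List.set_cons_succ]
      by_cases hpa : a = "1"
      · rw [List.filter_cons_of_neg (by simp [hpa]), List.filter_cons_of_neg (by simp [hpa])]
        exact ih m hm h
      · rw [List.filter_cons_of_pos (by simp [hpa]), List.filter_cons_of_pos (by simp [hpa]),
          List.length_cons, List.length_cons]
        exact Nat.succ_lt_succ (ih m hm h)

theorem pvSum_set_lt (l : List Nat) (n : Nat) (x : Nat) (hn : n < l.length) (h : x < l[n]) :
    (l.set n x).sum < l.sum := by
  induction l generalizing n with
  | nil => exact absurd hn (by simp)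
  | cons a t ih =>
    cases n with
    | zero =>
      simp only [List.getElem_cons_zero] at h
      rw [List.set_cons_zero, List.sum_cons, List.sum_cons]
      exact Nat.add_lt_add_right h _
    | succ n =>
      simp only [List.getElem_cons_succ] at h
      simp only [List.length_cons, Nat.succ_lt_succ_iff] at hn
      rw [List.set_cons_succ, List.sum_cons, List.sum_cons]
      exact Nat.add_lt_add_left (ih n hn h) a

-- marking a genuinely free cell strictly decreases the number of cells ≠ '1'
theorem pvFree_mark_lt (g : List (List String)) (i j : Int) (h : ¬ pvCellAt g i j = "1") :
    pvFree (pvMark g i j) < pvFree g := by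
  unfold pvCellAt at h
  by_cases hi : i.toNat < g.length
  · rw [List.getD_eq_getElem g [] hi] at h
    by_cases hj : j.toNat < (g[i.toNat]).length
    · rw [List.getD_eq_getElem _ "1" hj] at h
      unfold pvMark pvFree
      rw [List.getD_eq_getElem g [] hi, List.map_set]
      have hlen : i.toNat <
          (g.map (fun r => (r.filter (fun s => decide (s ≠ "1"))).length)).length := by
        simpa using hi
      refine pvSum_set_lt _ _ _ hlen ?_
      rw [List.getElem_map]
      exact pvFilter_set_lt _ _ hj h
    · rw [List.getD_eq_default _ "1" (by omega)] at h; exact absurd rfl h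
  · rw [List.getD_eq_default g [] (by omega)] at h
    simp [List.getD] at h

-- dfs only ever writes '1's: the measure never grows
theorem dfsF_free_le : ∀ (n : Nat) (g : List (List String)) (i j : Int),
    pvFree (dfsF n g i j).2 ≤ pvFree g := by
  intro n
  induction n with
  | zero => intro g i j; exact le_rfl
  | succ n ih =>
    intro g i j
    by_cases h1 : i < 0 ∨ (g.length : Int) ≤ i ∨ j < 0 ∨ ((g.head?.getD []).length : Int) ≤ j ∨ pvCellAt g i j = "1"
    · simp [dfsF, h1]
    · have hng : ¬(i < 0 ∨ (g.length : Int) ≤ i ∨ j < 0 ∨ ((g.head?.getD []).length : Int) ≤ j) :=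
        fun hc => h1 (by tauto)
      by_cases hm : pvCellAt g i j = "-"
      · simp [dfsF, h1, hm, hng]
      · have hlt := pvFree_mark_lt g i j (fun hc => h1 (Or.inr (Or.inr (Or.inr (Or.inr hc)))))
        have e1 := ih (pvMark g i j) (i - 1) j
        have e2 := ih (dfsF n (pvMark g i j) (i - 1) j).2 (i + 1) j
        have e3 := ih (dfsF n (dfsF n (pvMark g i j) (i - 1) j).2 (i + 1) j).2 i (j - 1)
        have e4 := ih (dfsF n (dfsF n (dfsF n (pvMark g i j) (i - 1) j).2 (i + 1) j).2 i (j - 1)).2 i (j + 1)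
        simp only [dfsF, if_neg h1, if_neg hm]
        split_ifs with hb1 hb2 hb3 <;> first
          | omega
          | (simp; omega)
          | simp

-- simulation invariant: A's mutated grid g' is the original g0 with exactly the visited
-- cells overwritten by '1' (and the same row/column shape)
def InvB (g0 : List (List String)) (vis : PySem.Set (Int × Int))
    (g' : List (List String)) : Prop :=
  g'.length = g0.length ∧
  (∀ k : Nat, (g'.getD k []).length = (g0.getD k []).length) ∧
  (∀ i j : Int, 0 ≤ i → i < (g0.length : Int) → 0 ≤ j → j < ((g0.headD []).length : Int) →
    pvCellAt g' i j = if (i, j) ∈ vis then "1" else pvCellAt g0 i j)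

-- headD/head?/getD bridges
theorem pvHead_eq_getD0 (l : List (List String)) : l.head?.getD [] = l.getD 0 [] := by
  cases l <;> rfl

theorem pvHeadD_eq_getD0 (l : List (List String)) : l.headD [] = l.getD 0 [] := by
  cases l <;> rfl

theorem pvGetD_set_cases (l : List (List String)) (n : Nat) (r : List String) (k : Nat) :
    (l.set n r).getD k [] = if k = n ∧ n < l.length then r else l.getD k [] := by
  by_cases hk : k = n
  · subst hk
    by_cases hn : k < l.length
    · rw [if_pos ⟨rfl, hn⟩, List.getD_eq_getElem _ _ (by rwa [List.length_set]),
        List.getElem_set_self]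
    · rw [if_neg (by tauto), List.set_eq_of_length_le (by omega)]
  · rw [if_neg (by tauto)]
    by_cases hlt : k < l.length
    · rw [List.getD_eq_getElem _ _ (by rwa [List.length_set]),
        List.getD_eq_getElem _ _ hlt, List.getElem_set_ne (by omega)]
    · rw [List.getD_eq_default _ _ (by rw [List.length_set]; omega),
        List.getD_eq_default _ _ (by omega)]

theorem pvGetD_str_set_cases (l : List String) (n : Nat) (k : Nat) :
    (l.set n "1").getD k "1" = if k = n ∧ n < l.length then "1" else l.getD k "1" := by
  by_cases hk : k = n
  · subst hk
    by_cases hn : k < l.length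
    · rw [if_pos ⟨rfl, hn⟩, List.getD_eq_getElem _ _ (by rwa [List.length_set]),
        List.getElem_set_self]
    · rw [if_neg (by tauto), List.set_eq_of_length_le (by omega)]
  · rw [if_neg (by tauto)]
    by_cases hlt : k < l.length
    · rw [List.getD_eq_getElem _ _ (by rwa [List.length_set]),
        List.getD_eq_getElem _ _ hlt, List.getElem_set_ne (by omega)]
    · rw [List.getD_eq_default _ _ (by rw [List.length_set]; omega),
        List.getD_eq_default _ _ (by omega)]

-- what a single mark does to a cell read (all indices nonnegative; the marked cell in range)
theorem pvCellAt_mark (g : List (List String)) (i j x y : Int)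
    (hi0 : 0 ≤ i) (hj0 : 0 ≤ j) (hx0 : 0 ≤ x) (hy0 : 0 ≤ y)
    (hilen : i.toNat < g.length) (hjlen : j.toNat < (g.getD i.toNat []).length) :
    pvCellAt (pvMark g i j) x y = if x = i ∧ y = j then "1" else pvCellAt g x y := by
  unfold pvCellAt pvMark
  rw [pvGetD_set_cases]
  by_cases hxi : x = i
  · subst hxi
    rw [if_pos ⟨by omega, hilen⟩, pvGetD_str_set_cases]
    by_cases hyj : y = j
    · subst hyj
      rw [if_pos ⟨rfl, hjlen⟩, if_pos ⟨rfl, rfl⟩]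
    · rw [if_neg (by omega), if_neg (by tauto)]
  · rw [if_neg (by omega), if_neg (by tauto)]

-- invariant consequences and preservation
theorem pvInv_len (g0 : List (List String)) (vis : PySem.Set (Int × Int))
    (g' : List (List String)) (h : InvB g0 vis g') :
    ((g'.length : Int) = (g0.length : Int)) ∧
      (((g'.head?.getD []).length : Int) = ((g0.headD []).length : Int)) := by
  refine ⟨by rw [h.1], ?_⟩
  rw [pvHead_eq_getD0, pvHeadD_eq_getD0, h.2.1 0]

theorem pvRow_wide (g0 : List (List String)) (hPre : Pre_isCaptured g0) (k : Nat)
    (hk : k < g0.length) : (g0.headD []).length ≤ (g0.getD k []).length := by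
  rw [List.getD_eq_getElem _ _ hk]
  exact hPre _ (List.getElem_mem hk)

theorem pvInv_mark (g0 : List (List String)) (hPre : Pre_isCaptured g0)
    (vis : PySem.Set (Int × Int)) (g' : List (List String)) (h : InvB g0 vis g')
    (i j : Int) (hi0 : 0 ≤ i) (hiR : i < (g0.length : Int)) (hj0 : 0 ≤ j)
    (hjC : j < ((g0.headD []).length : Int)) :
    InvB g0 (vis ++ [(i, j)]) (pvMark g' i j) := by
  have hilen : i.toNat < g'.length := by rw [h.1]; omega
  have hjlen : j.toNat < (g'.getD i.toNat []).length := by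
    rw [h.2.1 i.toNat]
    have := pvRow_wide g0 hPre i.toNat (by omega)
    omega
  refine ⟨by rw [pvMark, List.length_set, h.1], ?_, ?_⟩
  · intro k
    rw [pvMark, pvGetD_set_cases]
    by_cases hk : k = i.toNat ∧ i.toNat < g'.length
    · rw [if_pos hk, List.length_set, hk.1, h.2.1]
    · rw [if_neg hk, h.2.1]
  · intro x y hx0 hxR hy0 hyC
    rw [pvCellAt_mark g' i j x y hi0 hj0 hx0 hy0 hilen hjlen]
    by_cases hxy : x = i ∧ y = j
    · rw [if_pos hxy, if_pos (by simp [hxy.1, hxy.2])]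
    · rw [if_neg hxy, h.2.2 x y hx0 hxR hy0 hyC]
      have : ((x, y) ∈ vis ++ [(i, j)]) ↔ (x, y) ∈ vis := by
        simp only [List.mem_append, List.mem_singleton, Prod.mk.injEq]
        tauto
      by_cases hv : (x, y) ∈ vis
      · rw [if_pos hv, if_pos (this.mpr hv)]
      · rw [if_neg hv, if_neg (fun hc => hv (this.mp hc))]

-- A's dfs guard over the mutated grid is B's guard over the original grid plus the visited set
theorem pvGuard_iff (g0 : List (List String)) (vis : PySem.Set (Int × Int))
    (g' : List (List String)) (h : InvB g0 vis g') (i j : Int) :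
    (i < 0 ∨ (g'.length : Int) ≤ i ∨ j < 0 ∨ ((g'.head?.getD []).length : Int) ≤ j ∨ pvCellAt g' i j = "1")
    ↔ (i < 0 ∨ (g0.length : Int) ≤ i ∨ j < 0 ∨ ((g0.headD []).length : Int) ≤ j ∨ (i, j) ∈ vis ∨ pvCellAt g0 i j = "1") := by
  obtain ⟨hR, hC⟩ := pvInv_len g0 vis g' h
  by_cases hb : i < 0 ∨ (g0.length : Int) ≤ i ∨ j < 0 ∨ ((g0.headD []).length : Int) ≤ j
  · constructor
    · intro _; tauto
    · intro _
      rcases hb with hx | hx | hx | hx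
      · exact Or.inl hx
      · exact Or.inr (Or.inl (by omega))
      · exact Or.inr (Or.inr (Or.inl hx))
      · exact Or.inr (Or.inr (Or.inr (Or.inl (by omega))))
  · push_neg at hb
    have hcell := h.2.2 i j (by omega) (by omega) (by omega) (by omega)
    constructor
    · rintro (hx | hx | hx | hx | hx)
      · exact absurd hx (by omega)
      · exact absurd hx (by omega)
      · exact absurd hx (by omega)
      · exact absurd hx (by omega)
      · rw [hcell] at hx
        by_cases hv : (i, j) ∈ vis
        · exact Or.inr (Or.inr (Or.inr (Or.inr (Or.inl hv))))
        · rw [if_neg hv] at hx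
          exact Or.inr (Or.inr (Or.inr (Or.inr (Or.inr hx))))
    · rintro (hx | hx | hx | hx | hx | hx)
      · exact absurd hx (by omega)
      · exact absurd hx (by omega)
      · exact absurd hx (by omega)
      · exact absurd hx (by omega)
      · exact Or.inr (Or.inr (Or.inr (Or.inr (by rw [hcell, if_pos hx]))))
      · by_cases hv : (i, j) ∈ vis
        · exact Or.inr (Or.inr (Or.inr (Or.inr (by rw [hcell, if_pos hv]))))
        · exact Or.inr (Or.inr (Or.inr (Or.inr (by rw [hcell, if_neg hv]; exact hx))))

-- consequences of A's guard being false
theorem pvNotGuard (g0 : List (List String)) (vis : PySem.Set (Int × Int))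
    (g' : List (List String)) (h : InvB g0 vis g') (i j : Int)
    (h1 : ¬(i < 0 ∨ (g'.length : Int) ≤ i ∨ j < 0 ∨ ((g'.head?.getD []).length : Int) ≤ j ∨ pvCellAt g' i j = "1")) :
    (0 ≤ i ∧ i < (g0.length : Int) ∧ 0 ≤ j ∧ j < ((g0.headD []).length : Int)) ∧
      (i, j) ∉ vis ∧ pvCellAt g' i j = pvCellAt g0 i j := by
  obtain ⟨hR, hC⟩ := pvInv_len g0 vis g' h
  push_neg at h1
  obtain ⟨hi0, hiR, hj0, hjC, hne1⟩ := h1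
  have hcell := h.2.2 i j (by omega) (by omega) (by omega) (by omega)
  have hv : (i, j) ∉ vis := by
    intro hv
    rw [hcell, if_pos hv] at hne1
    exact hne1 rfl
  exact ⟨⟨by omega, by omega, by omega, by omega⟩, hv, by rw [hcell, if_neg hv]⟩

theorem fill_sim (g0 : List (List String)) (hPre : Pre_isCaptured g0) :
    ∀ n : Nat, ∀ (g' : List (List String)) (vis : PySem.Set (Int × Int)),
      InvB g0 vis g' → pvFree g' < n → ∀ (i j : Int) (rest : List (Int × Int)),
      ((dfsF n g' i j).1 = true →
        ∃ vis', InvB g0 vis' (dfsF n g' i j).2 ∧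
          fillB g0 (g0.length : Int) ((g0.headD []).length : Int) vis ((i, j) :: rest)
            = fillB g0 (g0.length : Int) ((g0.headD []).length : Int) vis' rest) ∧
      ((dfsF n g' i j).1 = false →
        fillB g0 (g0.length : Int) ((g0.headD []).length : Int) vis ((i, j) :: rest) = none) := by
  intro n
  induction n with
  | zero =>
    intro g' vis hInv hfree i j rest
    exact absurd hfree (Nat.not_lt_zero _)
  | succ n ih =>
    intro g' vis hInv hfree i j rest
    by_cases h1 : i < 0 ∨ (g'.length : Int) ≤ i ∨ j < 0 ∨ ((g'.head?.getD []).length : Int) ≤ j ∨ pvCellAt g' i j = "1"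
    · have hd : dfsF (n + 1) g' i j = (true, g') := by simp [dfsF, h1]
      have hfB : fillB g0 (g0.length : Int) ((g0.headD []).length : Int) vis ((i, j) :: rest)
          = fillB g0 (g0.length : Int) ((g0.headD []).length : Int) vis rest := by
        rw [fillB, dif_pos ((pvGuard_iff g0 vis g' hInv i j).mp h1)]
      rw [hd]
      exact ⟨fun _ => ⟨vis, hInv, hfB⟩, fun hc => by simp at hc⟩
    · obtain ⟨hb, hnv, hcv⟩ := pvNotGuard g0 vis g' hInv i j h1
      have h1B : ¬(i < 0 ∨ (g0.length : Int) ≤ i ∨ j < 0 ∨ ((g0.headD []).length : Int) ≤ j ∨ (i, j) ∈ vis ∨ pvCellAt g0 i j = "1") :=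
        fun hB => h1 ((pvGuard_iff g0 vis g' hInv i j).mpr hB)
      have hng : ¬(i < 0 ∨ (g'.length : Int) ≤ i ∨ j < 0 ∨ ((g'.head?.getD []).length : Int) ≤ j) :=
        fun hc => h1 (by tauto)
      by_cases hm : pvCellAt g' i j = "-"
      · have hd : dfsF (n + 1) g' i j = (false, g') := by simp [dfsF, h1, hm, hng]
        rw [hd]
        exact ⟨fun hc => by simp at hc, fun _ => by
          rw [fillB, dif_neg h1B, if_pos (by rw [← hcv]; exact hm)]⟩
      · have hlt : pvFree (pvMark g' i j) < pvFree g' :=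
          pvFree_mark_lt g' i j (fun hc => h1 (Or.inr (Or.inr (Or.inr (Or.inr hc)))))
        have hfree1 : pvFree (pvMark g' i j) < n := by omega
        have hInv1 : InvB g0 (vis ++ [(i, j)]) (pvMark g' i j) :=
          pvInv_mark g0 hPre vis g' hInv i j hb.1 hb.2.1 hb.2.2.1 hb.2.2.2
        have hstep : fillB g0 (g0.length : Int) ((g0.headD []).length : Int) vis ((i, j) :: rest)
            = fillB g0 (g0.length : Int) ((g0.headD []).length : Int) (vis ++ [(i, j)])
                ((i - 1, j) :: (i + 1, j) :: (i, j - 1) :: (i, j + 1) :: rest) := by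
          rw [fillB, dif_neg h1B, if_neg (by rw [← hcv]; exact hm), PySem.Set.add_of_not_mem hnv]
        have H1 := ih (pvMark g' i j) (vis ++ [(i, j)]) hInv1 hfree1 (i - 1) j
          ((i + 1, j) :: (i, j - 1) :: (i, j + 1) :: rest)
        cases hb1 : (dfsF n (pvMark g' i j) (i - 1) j).1 with
        | false =>
          have hA : dfsF (n + 1) g' i j = (false, (dfsF n (pvMark g' i j) (i - 1) j).2) := by
            simp [dfsF, h1, hm, hb1]
          refine ⟨fun hc => ?_, fun _ => ?_⟩
          · rw [hA] at hc; simp at hc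
          · rw [hstep, H1.2 hb1]
        | true =>
          obtain ⟨vis2, hI2, hE1⟩ := H1.1 hb1
          have hfree2 : pvFree (dfsF n (pvMark g' i j) (i - 1) j).2 < n :=
            lt_of_le_of_lt (dfsF_free_le n _ (i - 1) j) hfree1
          have H2 := ih (dfsF n (pvMark g' i j) (i - 1) j).2 vis2 hI2 hfree2 (i + 1) j
            ((i, j - 1) :: (i, j + 1) :: rest)
          cases hb2 : (dfsF n (dfsF n (pvMark g' i j) (i - 1) j).2 (i + 1) j).1 with
          | false =>
            have hA : dfsF (n + 1) g' i j
                = (false, (dfsF n (dfsF n (pvMark g' i j) (i - 1) j).2 (i + 1) j).2) := by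
              simp [dfsF, h1, hm, hb1, hb2]
            refine ⟨fun hc => ?_, fun _ => ?_⟩
            · rw [hA] at hc; simp at hc
            · rw [hstep, hE1, H2.2 hb2]
          | true =>
            obtain ⟨vis3, hI3, hE2⟩ := H2.1 hb2
            have hfree3 : pvFree (dfsF n (dfsF n (pvMark g' i j) (i - 1) j).2 (i + 1) j).2 < n :=
              lt_of_le_of_lt (dfsF_free_le n _ (i + 1) j) hfree2
            have H3 := ih (dfsF n (dfsF n (pvMark g' i j) (i - 1) j).2 (i + 1) j).2 vis3 hI3 hfree3 i (j - 1)
              ((i, j + 1) :: rest)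
            cases hb3 : (dfsF n (dfsF n (dfsF n (pvMark g' i j) (i - 1) j).2 (i + 1) j).2 i (j - 1)).1 with
            | false =>
              have hA : dfsF (n + 1) g' i j
                  = (false, (dfsF n (dfsF n (dfsF n (pvMark g' i j) (i - 1) j).2 (i + 1) j).2 i (j - 1)).2) := by
                simp [dfsF, h1, hm, hb1, hb2, hb3]
              refine ⟨fun hc => ?_, fun _ => ?_⟩
              · rw [hA] at hc; simp at hc
              · rw [hstep, hE1, hE2, H3.2 hb3]
            | true =>
              obtain ⟨vis4, hI4, hE3⟩ := H3.1 hb3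
              have hfree4 : pvFree (dfsF n (dfsF n (dfsF n (pvMark g' i j) (i - 1) j).2 (i + 1) j).2 i (j - 1)).2 < n :=
                lt_of_le_of_lt (dfsF_free_le n _ i (j - 1)) hfree3
              have H4 := ih (dfsF n (dfsF n (dfsF n (pvMark g' i j) (i - 1) j).2 (i + 1) j).2 i (j - 1)).2 vis4 hI4 hfree4 i (j + 1) rest
              have hA : dfsF (n + 1) g' i j
                  = dfsF n (dfsF n (dfsF n (dfsF n (pvMark g' i j) (i - 1) j).2 (i + 1) j).2 i (j - 1)).2 i (j + 1) := by
                simp [dfsF, h1, hm, hb1, hb2, hb3]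
              refine ⟨fun hc => ?_, fun hc => ?_⟩
              · rw [hA] at hc
                obtain ⟨vis5, hI5, hE4⟩ := H4.1 hc
                exact ⟨vis5, by rw [hA]; exact hI5, by rw [hstep, hE1, hE2, hE3, hE4]⟩
              · rw [hA] at hc
                rw [hstep, hE1, hE2, hE3, H4.2 hc]

theorem scan_sim (g0 : List (List String)) (hPre : Pre_isCaptured g0) :
    ∀ (cells : List (Int × Int)),
      (∀ p ∈ cells, 0 ≤ p.1 ∧ p.1 < (g0.length : Int) ∧ 0 ≤ p.2 ∧ p.2 < ((g0.headD []).length : Int)) →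
      ∀ (g' : List (List String)) (vis : PySem.Set (Int × Int)), InvB g0 vis g' →
      scanA g' cells = scanB g0 (g0.length : Int) ((g0.headD []).length : Int) vis cells := by
  intro cells
  induction cells with
  | nil => intro _ g' vis _; rfl
  | cons p rest ih =>
    intro hmem g' vis hInv
    obtain ⟨r, c⟩ := p
    obtain ⟨hr0, hrR, hc0, hcC⟩ := hmem (r, c) List.mem_cons_self
    have hmem' : ∀ p ∈ rest, 0 ≤ p.1 ∧ p.1 < (g0.length : Int) ∧ 0 ≤ p.2 ∧ p.2 < ((g0.headD []).length : Int) :=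
      fun p hp => hmem p (List.mem_cons_of_mem _ hp)
    have hcell := hInv.2.2 r c hr0 hrR hc0 hcC
    rw [scanA, scanB]
    by_cases hv : (r, c) ∈ vis
    · rw [if_neg (by rw [hcell, if_pos hv]; decide), if_pos (Or.inr hv)]
      exact ih hmem' g' vis hInv
    · have hcv : pvCellAt g' r c = pvCellAt g0 r c := by rw [hcell, if_neg hv]
      by_cases h0 : pvCellAt g0 r c = "0"
      · have hgB : ¬(pvCellAt g0 r c ≠ "0" ∨ (r, c) ∈ vis) := by
          rw [not_or]; exact ⟨not_not_intro h0, hv⟩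
        rw [if_pos (by rw [hcv]; exact h0), if_neg hgB]
        have H := fill_sim g0 hPre (pvFree g' + 1) g' vis hInv (Nat.lt_succ_self _) r c []
        cases hd : (dfsF (pvFree g' + 1) g' r c).1 with
        | false =>
          rw [H.2 hd]
          simp [hd]
        | true =>
          obtain ⟨vis', hI', hE⟩ := H.1 hd
          have hfill : fillB g0 (g0.length : Int) ((g0.headD []).length : Int) vis [(r, c)] = some vis' := by
            rw [hE, fillB]
          rw [hfill]
          simp only [hd]
          exact ih hmem' (dfsF (pvFree g' + 1) g' r c).2 vis' hI'
      · rw [if_neg (by rw [hcv]; exact h0), if_pos (Or.inl h0)]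
        exact ih hmem' g' vis hInv

theorem pvHeadGetD (l : List (List String)) : l.head?.getD [] = l.headD [] := by
  cases l <;> rfl

theorem pvCells_eq_indexList (g : List (List String)) :
    pvIndexList g = pvCells (g.length : Int) ((g.headD []).length : Int) := by
  unfold pvIndexList pvCells
  rw [pvHeadGetD]
  simp

theorem pvCells_bounds (rows cols : Int) :
    ∀ p ∈ pvCells rows cols, 0 ≤ p.1 ∧ p.1 < rows ∧ 0 ≤ p.2 ∧ p.2 < cols := by
  intro p hp
  unfold pvCells at hp
  rw [List.mem_flatMap] at hp
  obtain ⟨r, hr, hp⟩ := hp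
  rw [List.mem_map] at hp
  obtain ⟨c, hc, h⟩ := hp
  rw [List.mem_range] at hr hc
  subst h
  refine ⟨?_, ?_, ?_, ?_⟩ <;> simp <;> omega

theorem pvInv_init (g : List (List String)) : InvB g PySem.Set.empty g :=
  ⟨rfl, fun _ => rfl, fun i j _ _ _ _ => by rw [if_neg (by simp [PySem.Set.empty])]⟩

theorem pvColsMatch (g : List (List String)) :
    (match g with | [] => (0 : Int) | r :: _ => (r.length : Int)) = ((g.headD []).length : Int) := by
  cases g <;> simp

-- ===== VERDICT (by name: the statement is the Claim_ definition above) =====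
theorem isCaptured_spec : Claim_equal_isCaptured := by
  intro grid _ hPre
  unfold Spec_isCaptured isCaptured isCaptured_alt
  rw [pvColsMatch, ← pvCells_eq_indexList]
  exact (scan_sim grid hPre (pvIndexList grid)
    (by rw [pvCells_eq_indexList]; exact pvCells_bounds _ _) grid PySem.Set.empty
    (pvInv_init grid))
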